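-- pv_equiv track=rewrite | github.com/Speed-Jobs/backend-model | AI_Lab/recruit_schedule/test_03_pattern_extraction.py | get_dates_from_json
-- ===== SOURCE A (Python) =====
-- def get_dates_from_json(date_json):
--     """JSON 배열에서 시작/종료 날짜 추출"""
--     if not date_json:
--         return None, None
--
--     dates = []
--     for date_range in date_json:
--         if date_range and date_range[0]:
--             dates.append(date_range[0])
--         if date_range and len(date_range) > 1 and date_range[1]:
--             dates.append(date_range[1])
--
--     if not dates:
--         return None, None
--
--     return min(dates), max(dates)
-- ===== SOURCE B (Python) =====
-- def get_dates_from_json(date_json):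
--     """JSON 배열에서 시작/종료 날짜 추출 (single pass, no intermediate list)"""
--     if not date_json:
--         return None, None
--     lo = hi = None
--     for date_range in date_json:
--         if date_range and date_range[0]:
--             v = date_range[0]
--             if lo is None or v < lo:
--                 lo = v
--             if hi is None or v > hi:
--                 hi = v
--         if date_range and len(date_range) > 1 and date_range[1]:
--             v = date_range[1]
--             if lo is None or v < lo:
--                 lo = v
--             if hi is None or v > hi:
--                 hi = v
--     return lo, hi
-- ===== Notes on version B (the rewrite author's own statement) =====
-- stated objective: alternative
-- what changed: B drops the intermediate dates list entirely and maintains running lo/hi scalars in a single pass, returning them directly instead of collecting endpoints and calling min/max.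
import Mathlib
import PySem

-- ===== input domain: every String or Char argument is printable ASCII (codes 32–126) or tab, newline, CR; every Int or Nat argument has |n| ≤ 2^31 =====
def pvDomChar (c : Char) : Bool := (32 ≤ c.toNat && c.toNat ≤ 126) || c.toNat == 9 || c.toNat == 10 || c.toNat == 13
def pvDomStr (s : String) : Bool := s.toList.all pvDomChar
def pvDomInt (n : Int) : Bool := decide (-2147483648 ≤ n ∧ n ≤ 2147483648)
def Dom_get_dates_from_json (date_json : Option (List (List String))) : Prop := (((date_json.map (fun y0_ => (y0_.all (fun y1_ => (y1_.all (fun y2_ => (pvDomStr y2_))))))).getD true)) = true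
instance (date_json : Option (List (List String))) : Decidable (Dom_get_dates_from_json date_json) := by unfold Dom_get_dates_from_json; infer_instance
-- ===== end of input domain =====

-- B replaces A's collect-then-min/max with a single pass keeping running lo/hi scalars (objective: alternative decomposition).


-- ===== PORT A =====
-- one iteration of A's loop: append date_range[0] / date_range[1] if the guards pass
def pvStepA (acc : List String) (dr : List String) : List String :=
  let acc := if dr ≠ [] ∧ dr.headD "" ≠ "" then acc ++ [dr.headD ""] else acc
  if dr ≠ [] ∧ dr.length > 1 ∧ dr.getD 1 "" ≠ "" then acc ++ [dr.getD 1 ""] else acc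

def get_dates_from_json (date_json : Option (List (List String))) : Option String × Option String :=
  match date_json with
  | none => (none, none)
  | some l =>
    if l = [] then (none, none)
    else
      let dates := l.foldl pvStepA []
      if dates = [] then (none, none)
      else (PySem.List.min? dates (fun x => x), PySem.List.max? dates (fun x => x))

-- ===== PORT B =====
-- update the running (lo, hi) pair with one surviving endpoint v
def pvUpd (st : Option String × Option String) (v : String) : Option String × Option String :=
  let lo := match st.1 with
    | none => some v
    | some l => if v < l then some v else some l
  let hi := match st.2 with
    | none => some v
    | some h => if v > h then some v else some h
  (lo, hi)

-- one iteration of B's loop (same guards as A, but updating scalars)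
def pvStepB (st : Option String × Option String) (dr : List String) : Option String × Option String :=
  let st := if dr ≠ [] ∧ dr.headD "" ≠ "" then pvUpd st (dr.headD "") else st
  if dr ≠ [] ∧ dr.length > 1 ∧ dr.getD 1 "" ≠ "" then pvUpd st (dr.getD 1 "") else st

def get_dates_from_json_alt (date_json : Option (List (List String))) : Option String × Option String :=
  match date_json with
  | none => (none, none)
  | some l =>
    if l = [] then (none, none)
    else l.foldl pvStepB (none, none)

-- ===== PRECONDITION & SPEC =====
def Spec_get_dates_from_json (date_json : Option (List (List String))) (out : Option String × Option String) : Prop := out = get_dates_from_json_alt date_json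
instance (date_json : Option (List (List String))) (out : Option String × Option String) : Decidable (Spec_get_dates_from_json date_json out) := by unfold Spec_get_dates_from_json; infer_instance

-- ===== CLAIM (what is proved, stated in full; the proofs are below) =====
def Claim_equal_get_dates_from_json : Prop := ∀ (date_json : Option (List (List String))), Dom_get_dates_from_json date_json → Spec_get_dates_from_json date_json (get_dates_from_json date_json)

-- ===== LEMMAS AND PROOFS =====

-- the endpoints one date_range contributes
def pvExtract (dr : List String) : List String := pvStepA [] dr

theorem pvStepA_eq_append (acc dr : List String) : pvStepA acc dr = acc ++ pvExtract dr := by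
  simp only [pvExtract, pvStepA]
  split_ifs <;> simp

theorem pvStepB_eq_foldl (st : Option String × Option String) (dr : List String) :
    pvStepB st dr = (pvExtract dr).foldl pvUpd st := by
  simp only [pvExtract, pvStepA, pvStepB]
  split_ifs <;> simp [List.foldl]

theorem foldlA_eq_flatMap (l : List (List String)) (acc : List String) :
    l.foldl pvStepA acc = acc ++ l.flatMap pvExtract := by
  induction l generalizing acc with
  | nil => simp
  | cons h t ih => simp [List.foldl, pvStepA_eq_append, ih, List.append_assoc]

theorem foldlB_eq_flatMap (l : List (List String)) (st : Option String × Option String) :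
    l.foldl pvStepB st = (l.flatMap pvExtract).foldl pvUpd st := by
  induction l generalizing st with
  | nil => simp
  | cons h t ih => simp [List.foldl, pvStepB_eq_foldl, ih]

theorem pv_if_min (a v : String) : (if v < a then v else a) = min a v := by
  rcases lt_or_ge v a with h|h
  · rw [if_pos h, min_def, if_neg (not_le.mpr h)]
  · rw [if_neg (not_lt.mpr h), min_def, if_pos h]

theorem pv_if_max (b v : String) : (if v > b then v else b) = max b v := by
  rcases lt_or_ge b v with h|h
  · rw [if_pos h, max_def, if_pos h.le]
  · rw [if_neg (not_lt.mpr h), max_def]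
    split_ifs with h2
    · exact le_antisymm h2 h
    · rfl

theorem pvUpd_some (a b v : String) :
    pvUpd (some a, some b) v = (some (min a v), some (max b v)) := by
  simp only [pvUpd, Prod.mk.injEq, ← apply_ite (f := Option.some), Option.some.injEq]
  exact ⟨pv_if_min a v, pv_if_max b v⟩

theorem foldl_pvUpd_some (t : List String) (a b : String) :
    t.foldl pvUpd (some a, some b) = (some (t.foldl min a), some (t.foldl max b)) := by
  induction t generalizing a b with
  | nil => rfl
  | cons x xs ih => simp [List.foldl, pvUpd_some, ih]

theorem foldl_pvUpd_eq_minmax (ds : List String) :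
    ds.foldl pvUpd (none, none) =
      (PySem.List.min? ds (fun x => x), PySem.List.max? ds (fun x => x)) := by
  cases ds with
  | nil => simp [PySem.List.min?, PySem.List.max?]
  | cons x t =>
    have h1 : pvUpd ((none : Option String), (none : Option String)) x = (some x, some x) := rfl
    simp [List.foldl, h1, foldl_pvUpd_some, PySem.List.min?_id_cons, PySem.List.max?_id_cons]

-- ===== VERDICT (by name: the statement is the Claim_ definition above) =====
theorem get_dates_from_json_spec : Claim_equal_get_dates_from_json := by
  intro dj _
  unfold Spec_get_dates_from_json get_dates_from_json get_dates_from_json_alt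
  cases dj with
  | none => rfl
  | some l =>
    by_cases hl : l = []
    · simp [hl]
    · simp only [hl, if_false]
      rw [foldlA_eq_flatMap, foldlB_eq_flatMap, List.nil_append]
      by_cases hd : l.flatMap pvExtract = []
      · simp [hd]
      · simp only [hd, if_false]
        exact (foldl_pvUpd_eq_minmax _).symm
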